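-- pv_equiv track=rewrite | github.com/Storiesbyharshit/Competetive-Coding | GeeksforGeeks/Array/Max Occured Element in Ranges.py | maxOccured
-- ===== SOURCE A (Python) =====
-- def maxOccured(L,R,N,maxx):
--     arr = [0] * (maxx + 2)
--     for i in range(N):
--         arr[L[i]] += 1
--         arr[R[i] + 1] -= 1
--     for i in range(1, len(arr)):
--         arr[i] += arr[i-1]
--     maxi = max(arr)
--     for i in range(len(arr)):
--         if arr[i] == maxi:
--             return i
--             break
-- ===== SOURCE B (Python) =====
-- def maxOccured(L, R, N, maxx):
--     counts = [sum(1 if L[i] <= j <= R[i] else 0 for i in range(N)) for j in range(maxx + 2)]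
--     return counts.index(max(counts))
-- ===== Notes on version B (the rewrite author's own statement) =====
-- stated objective: simpler
-- what changed: Replaces the difference-array + prefix-sum sweep + first-max scan by a direct per-index coverage count (one comprehension) followed by counts.index(max(counts)).
-- outside the precondition, e.g. on maxOccured([-1], [-1], 1, 1): A returns 2, B returns 0
import Mathlib
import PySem

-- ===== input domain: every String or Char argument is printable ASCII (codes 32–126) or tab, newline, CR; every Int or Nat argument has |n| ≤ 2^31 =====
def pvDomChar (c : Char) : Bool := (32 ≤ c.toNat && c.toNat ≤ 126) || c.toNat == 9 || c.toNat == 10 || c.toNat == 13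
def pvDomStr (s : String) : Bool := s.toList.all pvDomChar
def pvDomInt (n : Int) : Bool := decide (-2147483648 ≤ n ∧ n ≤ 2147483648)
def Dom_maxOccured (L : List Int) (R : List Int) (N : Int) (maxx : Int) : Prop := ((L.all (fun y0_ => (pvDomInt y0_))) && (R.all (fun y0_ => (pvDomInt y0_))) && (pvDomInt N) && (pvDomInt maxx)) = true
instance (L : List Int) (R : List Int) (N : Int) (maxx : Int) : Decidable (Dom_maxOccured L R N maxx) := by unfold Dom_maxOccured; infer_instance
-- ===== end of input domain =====

-- B replaces A's difference-array + prefix-sum sweep by a direct per-index coverage count (simpler, not faster).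


-- ===== PORT A =====
-- A-side helpers: Python's list indexing on a Lean Array (negative indices wrap; an out-of-range
-- read yields the default and an out-of-range write is dropped -- exact under Pre_, where every
-- index used is in range).  The Python list is ported as Array for O(1) element updates.
def pvAGetD (a : Array Int) (i : Int) (d : Int) : Int :=
  if 0 <= i then a.getD i.toNat d
  else if 0 <= i + a.size then a.getD (i + a.size).toNat d
  else d

def pvASetD (a : Array Int) (i : Int) (v : Int) : Array Int :=
  if 0 <= i then a.setIfInBounds i.toNat v
  else if 0 <= i + a.size then a.setIfInBounds (i + a.size).toNat v
  else a

def maxOccured (L : List Int) (R : List Int) (N : Int) (maxx : Int) : Int :=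
  let arr : Array Int := Array.replicate (maxx + 2).toNat 0
  let arr := (PySem.List.pyRange 0 N 1).foldl (fun a i =>
      let li := PySem.List.pyGetD L i 0
      let a := pvASetD a li (pvAGetD a li 0 + 1)
      let ri := PySem.List.pyGetD R i 0 + 1
      pvASetD a ri (pvAGetD a ri 0 - 1)) arr
  let arr := (PySem.List.pyRange 1 (arr.size : Int) 1).foldl (fun a i =>
      pvASetD a i (pvAGetD a i 0 + pvAGetD a (i - 1) 0)) arr
  let maxi := (PySem.List.max? arr.toList (fun x => x)).getD 0
  ((PySem.List.pyRange 0 (arr.size : Int) 1).find? (fun i => pvAGetD arr i 0 == maxi)).getD 0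

-- ===== PORT B =====
def maxOccured_alt (L : List Int) (R : List Int) (N : Int) (maxx : Int) : Int :=
  let counts : List Int := (PySem.List.pyRange 0 (maxx + 2) 1).map (fun j =>
      ((PySem.List.pyRange 0 N 1).map (fun i =>
        if PySem.List.pyGetD L i 0 ≤ j ∧ j ≤ PySem.List.pyGetD R i 0 then (1 : Int) else 0)).sum)
  (((PySem.List.index? counts ((PySem.List.max? counts (fun x => x)).getD 0)).getD 0 : Nat) : Int)

-- ===== PRECONDITION & SPEC =====
-- Pre_ restricts to the task's natural domain: the N used ranges fit in L and R, the value array is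
-- nonempty (-1 ≤ maxx), and every range satisfies 0 ≤ L[i] ≤ R[i] ≤ maxx.  Outside it A either raises
-- (IndexError/ValueError) or, for negative L[i]/R[i], returns an accidental value via Python's
-- negative-index wraparound, which B does not reproduce.
def Pre_maxOccured (L : List Int) (R : List Int) (N : Int) (maxx : Int) : Prop :=
  N ≤ (L.length : Int) ∧ N ≤ (R.length : Int) ∧ -1 ≤ maxx ∧
  ∀ p ∈ (L.take N.toNat).zip (R.take N.toNat), 0 ≤ p.1 ∧ p.1 ≤ p.2 ∧ p.2 ≤ maxx
instance (L : List Int) (R : List Int) (N : Int) (maxx : Int) : Decidable (Pre_maxOccured L R N maxx) := by unfold Pre_maxOccured; infer_instance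

def pvWitness_maxOccured : List Int × List Int × Int × Int := ([0, 2, 1], [1, 3, 2], 3, 4)

def Spec_maxOccured (L : List Int) (R : List Int) (N : Int) (maxx : Int) (out : Int) : Prop := out = maxOccured_alt L R N maxx
instance (L : List Int) (R : List Int) (N : Int) (maxx : Int) (out : Int) : Decidable (Spec_maxOccured L R N maxx out) := by unfold Spec_maxOccured; infer_instance

-- ===== CLAIM (what is proved, stated in full; the proofs are below) =====
def Claim_equal_maxOccured : Prop := ∀ (L : List Int) (R : List Int) (N : Int) (maxx : Int), Dom_maxOccured L R N maxx → Pre_maxOccured L R N maxx → Spec_maxOccured L R N maxx (maxOccured L R N maxx)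

-- ===== LEMMAS AND PROOFS =====


def pvBump (a : List Int) (k : Nat) (v : Int) : List Int := a.set k (a.getD k 0 + v)

theorem pvBump_length (a : List Int) (k : Nat) (v : Int) : (pvBump a k v).length = a.length := by
  simp [pvBump]

theorem pvBump_getD (a : List Int) (k : Nat) (v : Int) (hk : k < a.length) (j : Nat) :
    (pvBump a k v).getD j 0 = a.getD j 0 + if j = k then v else 0 := by
  by_cases h : j = k
  · subst h; simp [pvBump, List.getD_eq_getElem?_getD, hk]
  · simp [pvBump, List.getD_eq_getElem?_getD, h, Ne.symm h]

def pvGood (L R : List Int) (maxx i : Int) : Prop :=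
  0 ≤ i ∧ i.toNat < L.length ∧ i.toNat < R.length ∧
  0 ≤ L.getD i.toNat 0 ∧ L.getD i.toNat 0 ≤ R.getD i.toNat 0 ∧ R.getD i.toNat 0 ≤ maxx

def pvDelta (L R : List Int) (idxs : List Int) (j : Int) : Int :=
  (idxs.map (fun i => (if PySem.List.pyGetD L i 0 = j then (1:Int) else 0)
                    + (if PySem.List.pyGetD R i 0 + 1 = j then (-1:Int) else 0))).sum

def pvCov (L R : List Int) (idxs : List Int) (j : Int) : Int :=
  (idxs.map (fun i =>
    if PySem.List.pyGetD L i 0 ≤ j ∧ j ≤ PySem.List.pyGetD R i 0 then (1:Int) else 0)).sum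

def pvPrefix (a : List Int) (j : Nat) : Int := ((List.range (j+1)).map (fun k => a.getD k 0)).sum

theorem loop1_char (L R : List Int) (maxx : Int) (idxs : List Int) :
    ∀ a : List Int, a.length = (maxx + 2).toNat →
    (∀ i ∈ idxs, pvGood L R maxx i) →
    (idxs.foldl (fun a i =>
      let li := PySem.List.pyGetD L i 0
      let a := PySem.List.pySetD a li (PySem.List.pyGetD a li 0 + 1)
      let ri := PySem.List.pyGetD R i 0 + 1
      PySem.List.pySetD a ri (PySem.List.pyGetD a ri 0 - 1)) a).length = (maxx + 2).toNat ∧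
    ∀ j : Nat, (idxs.foldl (fun a i =>
      let li := PySem.List.pyGetD L i 0
      let a := PySem.List.pySetD a li (PySem.List.pyGetD a li 0 + 1)
      let ri := PySem.List.pyGetD R i 0 + 1
      PySem.List.pySetD a ri (PySem.List.pyGetD a ri 0 - 1)) a).getD j 0
      = a.getD j 0 + pvDelta L R idxs (j : Int) := by
  induction idxs with
  | nil => intro a ha _; simpa [pvDelta] using ha
  | cons i t ih =>
    intro a ha hg
    obtain ⟨hi0, hiL, hiR, h0L, hLle, hRle⟩ := hg i (List.mem_cons_self ..)
    have hLi : PySem.List.pyGetD L i 0 = L.getD i.toNat 0 := PySem.List.pyGetD_of_nonneg L 0 hi0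
    have hRi : PySem.List.pyGetD R i 0 = R.getD i.toNat 0 := PySem.List.pyGetD_of_nonneg R 0 hi0
    have h0L' : 0 ≤ PySem.List.pyGetD L i 0 := by rw [hLi]; exact h0L
    have h0R' : 0 ≤ PySem.List.pyGetD R i 0 + 1 := by rw [hRi]; omega
    have hstep : (let li := PySem.List.pyGetD L i 0
        let a := PySem.List.pySetD a li (PySem.List.pyGetD a li 0 + 1)
        let ri := PySem.List.pyGetD R i 0 + 1
        PySem.List.pySetD a ri (PySem.List.pyGetD a ri 0 - 1))
        = pvBump (pvBump a (PySem.List.pyGetD L i 0).toNat 1)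
                 ((PySem.List.pyGetD R i 0 + 1).toNat) (-1) := by
      simp only [pvBump, PySem.List.pySetD_of_nonneg _ _ h0L',
        PySem.List.pySetD_of_nonneg _ _ h0R',
        PySem.List.pyGetD_of_nonneg _ _ h0L', PySem.List.pyGetD_of_nonneg _ _ h0R',
        sub_eq_add_neg]
    have hkL : (PySem.List.pyGetD L i 0).toNat < a.length := by
      rw [hLi]; omega
    have hkR : (PySem.List.pyGetD R i 0 + 1).toNat < (pvBump a (PySem.List.pyGetD L i 0).toNat 1).length := by
      rw [pvBump_length, hRi]; omega
    have hb_len : (pvBump (pvBump a (PySem.List.pyGetD L i 0).toNat 1)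
        ((PySem.List.pyGetD R i 0 + 1).toNat) (-1)).length = (maxx + 2).toNat := by
      rw [pvBump_length, pvBump_length]; exact ha
    have ih' := ih _ hb_len (fun x hx => hg x (List.mem_cons_of_mem _ hx))
    constructor
    · rw [List.foldl_cons, hstep]; exact ih'.1
    · intro j
      rw [List.foldl_cons, hstep, ih'.2 j,
        pvBump_getD _ _ _ hkR, pvBump_getD _ _ _ hkL]
      simp only [pvDelta, List.map_cons, List.sum_cons]
      have e1 : (if j = (PySem.List.pyGetD L i 0).toNat then (1:Int) else 0)
          = (if PySem.List.pyGetD L i 0 = (j:Int) then (1:Int) else 0) := by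
        split_ifs <;> omega
      have e2 : (if j = (PySem.List.pyGetD R i 0 + 1).toNat then (-1:Int) else 0)
          = (if PySem.List.pyGetD R i 0 + 1 = (j:Int) then (-1:Int) else 0) := by
        split_ifs <;> omega
      rw [e1, e2]; ring

theorem pvPrefix_succ (a : List Int) (m : Nat) (hm : 1 ≤ m) :
    pvPrefix a m = pvPrefix a (m - 1) + a.getD m 0 := by
  obtain ⟨m', rfl⟩ : ∃ m', m = m' + 1 := ⟨m - 1, by omega⟩
  simp [pvPrefix, List.range_succ]
  ring

theorem loop2_char (a : List Int) (m : Nat) (hm : 1 ≤ m) (hml : m ≤ a.length) :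
    ((PySem.List.pyRange 1 (m : Int) 1).foldl (fun a i =>
        PySem.List.pySetD a i (PySem.List.pyGetD a i 0 + PySem.List.pyGetD a (i - 1) 0)) a).length
      = a.length ∧
    ∀ j : Nat, ((PySem.List.pyRange 1 (m : Int) 1).foldl (fun a i =>
        PySem.List.pySetD a i (PySem.List.pyGetD a i 0 + PySem.List.pyGetD a (i - 1) 0)) a).getD j 0
      = if j < m then pvPrefix a j else a.getD j 0 := by
  induction m with
  | zero => omega
  | succ m ih =>
    by_cases hm1 : m = 0
    · subst hm1
      rw [show ((1:Nat) : Int) = 1 by norm_num, PySem.List.pyRange_one_eq_nil le_rfl]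
      refine ⟨rfl, fun j => ?_⟩
      simp only [List.foldl_nil]
      by_cases hj : j < 1
      · have : j = 0 := by omega
        subst this
        simp [pvPrefix]
      · rw [if_neg hj]
    · have hm' : 1 ≤ m := by omega
      have ih' := ih hm' (by omega)
      have hsplit : PySem.List.pyRange 1 ((m + 1 : Nat) : Int) 1
          = PySem.List.pyRange 1 (m : Int) 1 ++ [(m : Int)] := by
        push_cast
        exact PySem.List.pyRange_one_succ_right (by exact_mod_cast hm')
      set r := (PySem.List.pyRange 1 (m : Int) 1).foldl (fun a i =>
        PySem.List.pySetD a i (PySem.List.pyGetD a i 0 + PySem.List.pyGetD a (i - 1) 0)) a with hr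
      have hrlen : r.length = a.length := ih'.1
      have hstep : (PySem.List.pyRange 1 ((m + 1 : Nat) : Int) 1).foldl (fun a i =>
          PySem.List.pySetD a i (PySem.List.pyGetD a i 0 + PySem.List.pyGetD a (i - 1) 0)) a
          = pvBump r m (r.getD (m - 1) 0) := by
        rw [hsplit, List.foldl_append, ← hr]
        simp only [List.foldl_cons, List.foldl_nil]
        have hc : ((m : Int) - 1) = ((m - 1 : Nat) : Int) := by omega
        rw [hc, PySem.List.pyGetD_natCast, PySem.List.pyGetD_natCast, PySem.List.pySetD_natCast]
        rfl
      have hmr : m < r.length := by omega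
      refine ⟨by rw [hstep, pvBump_length]; omega, fun j => ?_⟩
      rw [hstep, pvBump_getD _ _ _ hmr]
      by_cases hjm : j = m
      · subst hjm
        rw [if_pos rfl, ih'.2 j, if_neg (lt_irrefl j), ih'.2 (j-1),
          if_pos (show j - 1 < j by omega), if_pos (show j < j + 1 by omega),
          pvPrefix_succ a j hm']
        ring
      · rw [if_neg hjm, ih'.2 j]
        by_cases hjlt : j < m
        · rw [if_pos hjlt, if_pos (show j < m + 1 by omega)]
          ring
        · rw [if_neg hjlt, if_neg (show ¬ j < m + 1 by omega)]
          ring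





theorem sum_ite_range (c v : Int) (m : Nat) :
    ((List.range m).map (fun k : Nat => if c = (k:Int) then v else 0)).sum
      = if 0 ≤ c ∧ c < (m:Int) then v else 0 := by
  induction m with
  | zero => simp
  | succ m ih =>
    rw [List.range_succ, List.map_append, List.sum_append, ih]
    simp only [List.map_cons, List.map_nil, List.sum_cons, List.sum_nil]
    push_cast
    split_ifs <;> first | (exfalso; omega) | ring

theorem sum_range_delta (L R : List Int) (maxx : Int) (idxs : List Int)
    (h : ∀ i ∈ idxs, pvGood L R maxx i) (j : Nat) :
    ((List.range (j+1)).map (fun k : Nat => pvDelta L R idxs (k:Int))).sum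
      = pvCov L R idxs (j:Int) := by
  induction idxs with
  | nil => simp [pvDelta, pvCov]
  | cons i t ih =>
    obtain ⟨hi0, hiL, hiR, h0L, hLle, hRle⟩ := h i (List.mem_cons_self ..)
    have hLi : PySem.List.pyGetD L i 0 = L.getD i.toNat 0 := PySem.List.pyGetD_of_nonneg L 0 hi0
    have hRi : PySem.List.pyGetD R i 0 = R.getD i.toNat 0 := PySem.List.pyGetD_of_nonneg R 0 hi0
    have ih' := ih (fun x hx => h x (List.mem_cons_of_mem _ hx))
    have hsplit : (fun k : Nat => pvDelta L R (i :: t) (k:Int))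
        = fun k : Nat => ((if PySem.List.pyGetD L i 0 = (k:Int) then (1:Int) else 0)
            + (if PySem.List.pyGetD R i 0 + 1 = (k:Int) then (-1:Int) else 0)) + pvDelta L R t (k:Int) := by
      funext k; simp [pvDelta]
    rw [hsplit, PySem.List.sum_map_add_int, PySem.List.sum_map_add_int, ih',
      sum_ite_range, sum_ite_range]
    simp only [pvCov, List.map_cons, List.sum_cons]
    rw [hLi, hRi]
    have hj1 : ((j + 1 : Nat) : Int) = (j : Int) + 1 := by push_cast; ring
    rw [hj1]
    split_ifs <;> omega

theorem find_range_nat (a : List Int) (m : Int) :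
    m ∈ a → (List.range a.length).find? (fun k => a.getD k 0 == m) = some (a.idxOf m) := by
  induction a with
  | nil => intro h; simp at h
  | cons x t ih =>
    intro hm
    rw [List.length_cons, List.range_succ_eq_map, List.find?_cons]
    by_cases hx : x = m
    · subst hx
      simp [List.idxOf_cons_self]
    · have hbeq : ((x :: t).getD 0 0 == m) = false := by
        simp [hx]
      rw [hbeq]
      have hmt : m ∈ t := by
        rcases List.mem_cons.mp hm with h | h
        · exact absurd h.symm hx
        · exact h
      rw [List.find?_map]
      have hcomp : ((fun k => (x :: t).getD k 0 == m) ∘ Nat.succ) = fun k => t.getD k 0 == m := by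
        funext k; simp
      rw [hcomp, ih hmt]
      simp [List.idxOf_cons_ne _ hx]


theorem idxOf?_of_mem (a : List Int) (m : Int) :
    m ∈ a → List.idxOf? m a = some (a.idxOf m) := by
  induction a with
  | nil => intro h; simp at h
  | cons x t ih =>
    intro hm
    rw [List.idxOf?_cons]
    by_cases hx : x = m
    · subst hx; simp [List.idxOf_cons_self]
    · have hmt : m ∈ t := by
        rcases List.mem_cons.mp hm with h | h
        · exact absurd h.symm hx
        · exact h
      simp only [beq_iff_eq, hx, if_false]
      rw [ih hmt, List.idxOf_cons_ne _ hx]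
      rfl

theorem find_range (a : List Int) (m : Int) (hm : m ∈ a) :
    (PySem.List.pyRange 0 (a.length : Int) 1).find? (fun i => PySem.List.pyGetD a i 0 == m)
      = some ((a.idxOf m : Nat) : Int) := by
  rw [PySem.List.pyRange_zero_nat, List.find?_map]
  have hcomp : ((fun i => PySem.List.pyGetD a i 0 == m) ∘ fun k : Nat => ((k : Int)))
      = fun k : Nat => a.getD k 0 == m := by
    funext k; simp [PySem.List.pyGetD_natCast]
  rw [hcomp, find_range_nat a m hm]
  rfl

theorem extract_eq (a : List Int) (ha : a ≠ []) :
    ((PySem.List.pyRange 0 (a.length : Int) 1).find? (fun i =>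
        PySem.List.pyGetD a i 0 == (PySem.List.max? a (fun x => x)).getD 0)).getD 0
      = (((PySem.List.index? a ((PySem.List.max? a (fun x => x)).getD 0)).getD 0 : Nat) : Int) := by
  obtain ⟨m, hm⟩ : ∃ m, PySem.List.max? a (fun x => x) = some m := by
    cases h : PySem.List.max? a (fun x => x) with
    | none => exact absurd ((PySem.List.max?_eq_none_iff a _).mp h) ha
    | some m => exact ⟨m, rfl⟩
  have hmem : m ∈ a := PySem.List.max?_mem hm
  rw [hm]
  simp only [Option.getD_some]
  rw [find_range a m hmem, PySem.List.index?_eq_idxOf?, idxOf?_of_mem a m hmem]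
  rfl

theorem getD_replicate_zero (n j : Nat) : (List.replicate n (0:Int)).getD j 0 = 0 := by
  rcases lt_or_ge j n with h | h
  · rw [List.getD_replicate _ h]
  · exact List.getD_eq_default _ _ (by simpa using h)

theorem pvAGetD_toList (a : Array Int) (i : Int) (d : Int) (h : 0 ≤ i) :
    pvAGetD a i d = PySem.List.pyGetD a.toList i d := by
  rw [PySem.List.pyGetD_of_nonneg _ _ h]
  simp [pvAGetD, h, Array.getD_eq_getD_getElem?, List.getD_eq_getElem?_getD]

theorem toList_pvASetD (a : Array Int) (i : Int) (v : Int) (h : 0 ≤ i) :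
    (pvASetD a i v).toList = PySem.List.pySetD a.toList i v := by
  rw [PySem.List.pySetD_of_nonneg _ _ h]
  simp [pvASetD, h]

theorem loop1_arr (L R : List Int) (maxx : Int) (idxs : List Int) :
    ∀ a : Array Int, (∀ i ∈ idxs, pvGood L R maxx i) →
    (idxs.foldl (fun a i =>
      let li := PySem.List.pyGetD L i 0
      let a := pvASetD a li (pvAGetD a li 0 + 1)
      let ri := PySem.List.pyGetD R i 0 + 1
      pvASetD a ri (pvAGetD a ri 0 - 1)) a).toList
    = idxs.foldl (fun a i =>
      let li := PySem.List.pyGetD L i 0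
      let a := PySem.List.pySetD a li (PySem.List.pyGetD a li 0 + 1)
      let ri := PySem.List.pyGetD R i 0 + 1
      PySem.List.pySetD a ri (PySem.List.pyGetD a ri 0 - 1)) a.toList := by
  induction idxs with
  | nil => intro a _; rfl
  | cons i t ih =>
    intro a hg
    obtain ⟨hi0, hiL, hiR, h0L, hLle, hRle⟩ := hg i (List.mem_cons_self ..)
    have h0L' : 0 ≤ PySem.List.pyGetD L i 0 := by
      rw [PySem.List.pyGetD_of_nonneg L 0 hi0]; exact h0L
    have h0R' : 0 ≤ PySem.List.pyGetD R i 0 + 1 := by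
      rw [PySem.List.pyGetD_of_nonneg R 0 hi0]; omega
    rw [List.foldl_cons, List.foldl_cons, ih _ (fun x hx => hg x (List.mem_cons_of_mem _ hx))]
    congr 1
    rw [toList_pvASetD _ _ _ h0R', pvAGetD_toList _ _ _ h0R',
      toList_pvASetD _ _ _ h0L', pvAGetD_toList _ _ _ h0L']

theorem loop2_arr (l : List Int) :
    ∀ a : Array Int, (∀ i ∈ l, 1 ≤ i) →
    (l.foldl (fun a i => pvASetD a i (pvAGetD a i 0 + pvAGetD a (i - 1) 0)) a).toList
    = l.foldl (fun a i =>
        PySem.List.pySetD a i (PySem.List.pyGetD a i 0 + PySem.List.pyGetD a (i - 1) 0)) a.toList := by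
  induction l with
  | nil => intro a _; rfl
  | cons i t ih =>
    intro a hg
    have h1 : (1:Int) ≤ i := hg i (List.mem_cons_self ..)
    have h0 : (0:Int) ≤ i := by omega
    have h0' : (0:Int) ≤ i - 1 := by omega
    rw [List.foldl_cons, List.foldl_cons, ih _ (fun x hx => hg x (List.mem_cons_of_mem _ hx))]
    congr 1
    rw [toList_pvASetD _ _ _ h0, pvAGetD_toList _ _ _ h0, pvAGetD_toList _ _ _ h0']

theorem find?_congr_mem (p q : Int → Bool) :
    ∀ l : List Int, (∀ x ∈ l, p x = q x) → l.find? p = l.find? q := by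
  intro l
  induction l with
  | nil => intro _; rfl
  | cons x t ih =>
    intro h
    rw [List.find?_cons, List.find?_cons, h x (List.mem_cons_self ..),
      ih (fun y hy => h y (List.mem_cons_of_mem _ hy))]

-- ===== VERDICT (by name: the statement is the Claim_ definition above) =====
theorem maxOccured_spec : Claim_equal_maxOccured := by
  intro L R N maxx hdom hpre
  obtain ⟨hNL, hNR, hmx, hLR⟩ := hpre
  unfold Spec_maxOccured
  have hn1 : 1 ≤ (maxx + 2).toNat := by omega
  have hgood : ∀ i ∈ PySem.List.pyRange 0 N 1, pvGood L R maxx i := by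
    intro i hi
    rw [PySem.List.mem_pyRange_one] at hi
    have h0 : 0 ≤ i := hi.1
    have hkL : i.toNat < L.length := by omega
    have hkR : i.toNat < R.length := by omega
    have hzlen : i.toNat < ((L.take N.toNat).zip (R.take N.toNat)).length := by
      simp only [List.length_zip, List.length_take]
      omega
    have hb := hLR _ (List.getElem_mem hzlen)
    rw [List.getElem_zip] at hb
    simp only [List.getElem_take] at hb
    exact ⟨h0, hkL, hkR,
      by rw [List.getD_eq_getElem L 0 hkL]; exact hb.1,
      by rw [List.getD_eq_getElem L 0 hkL, List.getD_eq_getElem R 0 hkR]; exact hb.2.1,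
      by rw [List.getD_eq_getElem R 0 hkR]; exact hb.2.2⟩
  have h1 := loop1_char L R maxx (PySem.List.pyRange 0 N 1) (List.replicate (maxx + 2).toNat (0:Int))
    (by simp) hgood
  set arr1 := (PySem.List.pyRange 0 N 1).foldl (fun a i =>
      let li := PySem.List.pyGetD L i 0
      let a := PySem.List.pySetD a li (PySem.List.pyGetD a li 0 + 1)
      let ri := PySem.List.pyGetD R i 0 + 1
      PySem.List.pySetD a ri (PySem.List.pyGetD a ri 0 - 1)) (List.replicate (maxx + 2).toNat (0:Int))
    with harr1
  have hlen1 : arr1.length = (maxx + 2).toNat := h1.1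
  have h2 := loop2_char arr1 (maxx + 2).toNat hn1 (le_of_eq hlen1.symm)
  set arr2 := (PySem.List.pyRange 1 (((maxx + 2).toNat : Nat) : Int) 1).foldl (fun a i =>
      PySem.List.pySetD a i (PySem.List.pyGetD a i 0 + PySem.List.pyGetD a (i - 1) 0)) arr1
    with harr2
  set counts := (PySem.List.pyRange 0 (maxx + 2) 1).map (fun j =>
      ((PySem.List.pyRange 0 N 1).map (fun i =>
        if PySem.List.pyGetD L i 0 ≤ j ∧ j ≤ PySem.List.pyGetD R i 0 then (1 : Int) else 0)).sum)
    with hcounts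
  have hclen : counts.length = (maxx + 2).toNat := by
    rw [hcounts]
    simp [PySem.List.length_pyRange_one]
  have hkey : arr2 = counts := by
    apply List.ext_getElem
    · rw [h2.1, hlen1, hclen]
    · intro j hj1 hj2
      have hjn : j < (maxx + 2).toNat := by rw [h2.1, hlen1] at hj1; exact hj1
      rw [← List.getD_eq_getElem arr2 0 hj1, ← List.getD_eq_getElem counts 0 hj2]
      rw [h2.2 j, if_pos hjn]
      have hmap : ∀ k ∈ List.range (j + 1),
          arr1.getD k 0 = pvDelta L R (PySem.List.pyRange 0 N 1) (k : Int) := by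
        intro k _
        rw [h1.2 k, getD_replicate_zero, zero_add]
      calc pvPrefix arr1 j
          = ((List.range (j + 1)).map (fun k : Nat =>
              pvDelta L R (PySem.List.pyRange 0 N 1) (k : Int))).sum :=
            congrArg List.sum (List.map_congr_left hmap)
        _ = pvCov L R (PySem.List.pyRange 0 N 1) (j : Int) := sum_range_delta L R maxx _ hgood j
        _ = counts.getD j 0 := by
            rw [← PySem.List.pyGetD_natCast counts j 0, hcounts,
              PySem.List.pyGetD_map_pyRange_of_nonneg _ (maxx + 2) (j : Int) 0
                (by omega) (by omega)]
            rfl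
  have hne : counts ≠ [] := by
    intro h
    rw [h] at hclen
    simp at hclen
    omega
  -- array side
  set arrA1 := (PySem.List.pyRange 0 N 1).foldl (fun a i =>
      let li := PySem.List.pyGetD L i 0
      let a := pvASetD a li (pvAGetD a li 0 + 1)
      let ri := PySem.List.pyGetD R i 0 + 1
      pvASetD a ri (pvAGetD a ri 0 - 1)) (Array.replicate (maxx + 2).toNat (0:Int))
    with harrA1
  have hA1 : arrA1.toList = arr1 := by
    rw [harrA1, loop1_arr L R maxx _ _ hgood, Array.toList_replicate]
  have hszA1 : ((arrA1.size : Nat) : Int) = (((maxx + 2).toNat : Nat) : Int) := by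
    rw [← Array.length_toList, hA1, hlen1]
  set arrA2 := (PySem.List.pyRange 1 ((arrA1.size : Nat) : Int) 1).foldl (fun a i =>
      pvASetD a i (pvAGetD a i 0 + pvAGetD a (i - 1) 0)) arrA1
    with harrA2
  have hmem2 : ∀ i ∈ PySem.List.pyRange 1 ((arrA1.size : Nat) : Int) 1, (1:Int) ≤ i := by
    intro i hi
    exact (PySem.List.mem_pyRange_one.mp hi).1
  have hkeyA : arrA2.toList = counts := by
    rw [harrA2, loop2_arr _ _ hmem2, hA1, hszA1, ← harr2, hkey]
  have hsz2 : ((arrA2.size : Nat) : Int) = ((counts.length : Nat) : Int) := by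
    rw [← Array.length_toList, hkeyA]
  have hA : maxOccured L R N maxx
      = ((PySem.List.pyRange 0 ((arrA2.size : Nat) : Int) 1).find? (fun i =>
          pvAGetD arrA2 i 0 == (PySem.List.max? arrA2.toList (fun x => x)).getD 0)).getD 0 := rfl
  have hB : maxOccured_alt L R N maxx
      = (((PySem.List.index? counts ((PySem.List.max? counts (fun x => x)).getD 0)).getD 0 : Nat) : Int) := rfl
  have hpred : ∀ i ∈ PySem.List.pyRange 0 ((counts.length : Nat) : Int) 1,
      (pvAGetD arrA2 i 0 == (PySem.List.max? counts (fun x => x)).getD 0)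
        = (PySem.List.pyGetD counts i 0 == (PySem.List.max? counts (fun x => x)).getD 0) := by
    intro i hi
    have h0 : (0:Int) ≤ i := (PySem.List.mem_pyRange_one.mp hi).1
    rw [pvAGetD_toList _ _ _ h0, hkeyA]
  rw [hA, hB, hkeyA, hsz2,
    find?_congr_mem _ _ _ hpred]
  exact extract_eq counts hne
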